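-- pv_equiv track=rewrite | github.com/dodaro/SDL | grammar.py | declarations
-- ===== SOURCE A (Python) =====
-- def declarations(args):
-- 	statements=""
-- 	for i in range(0, len(args)):
-- 		if(args[i]==","):
-- 			statements+="\n"
-- 		else:
-- 			statements+=f"{args[i]}"
-- 	return statements
-- ===== SOURCE B (Python) =====
-- def declarations(args):
--     try:
--         i = args.index(",")
--     except ValueError:
--         return "".join(f"{x}" for x in args)
--     return "".join(f"{x}" for x in args[:i]) + "\n" + declarations(args[i + 1:])
-- ===== Notes on version B (the rewrite author's own statement) =====
-- stated objective: alternative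
-- what changed: Instead of A's single index loop appending one element (or a newline) at a time to one string, B is recursive on the first-comma decomposition: it locates the first ',' with list.index, joins the comma-free prefix in one ''.join, emits '\n', and recurses on the suffix after the comma.
import Mathlib
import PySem

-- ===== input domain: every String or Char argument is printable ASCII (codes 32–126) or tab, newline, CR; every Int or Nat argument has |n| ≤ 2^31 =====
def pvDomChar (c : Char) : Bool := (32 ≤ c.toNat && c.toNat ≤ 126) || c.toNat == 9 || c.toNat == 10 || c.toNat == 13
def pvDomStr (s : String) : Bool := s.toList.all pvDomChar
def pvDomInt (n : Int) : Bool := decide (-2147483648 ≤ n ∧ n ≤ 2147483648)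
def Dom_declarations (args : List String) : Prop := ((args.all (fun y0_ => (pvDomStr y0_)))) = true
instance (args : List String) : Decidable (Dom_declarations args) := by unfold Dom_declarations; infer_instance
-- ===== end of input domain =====

-- B replaces A's single element-by-element accumulation loop by recursion on the
-- first-comma decomposition (find ',' with index, join the prefix, recurse on the
-- suffix); alternative decomposition, same return value everywhere.


-- ===== PORT A =====
-- for i in range(0, len(args)): args[i] is always in range, so pyGetD with default "" is exact
def declarations (args : List String) : String :=
  (PySem.List.pyRange 0 (PySem.List.len args)).foldl
    (fun statements i =>
      (fun st (s : String) => if s = "," then st ++ "\n" else st ++ s)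
        statements (PySem.List.pyGetD args i ""))
    ""

-- ===== PORT B =====
-- args.index(",") raises ValueError iff "," ∉ args, i.e. index? = none: the 'none'
-- branch is the except-branch. f"{x}" on a string is the identity.
def declarations_alt (args : List String) : String :=
  match hi : PySem.List.index? args "," with
  | none => PySem.Str.join "" args
  | some i =>
      PySem.Str.join "" (PySem.List.slice args (some 0) (some (i : Int))) ++ "\n" ++
      declarations_alt (PySem.List.slice args (some ((i : Int) + 1)) none)
termination_by args.length
decreasing_by
  have h := PySem.List.getElem_of_index?_eq_some hi
  obtain ⟨hk, -, -⟩ := h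
  have : (PySem.List.slice args (some ((i : Int) + 1)) none) = args.drop (i + 1) := by
    have : ((i : Int) + 1) = ((i + 1 : Nat) : Int) := by push_cast; ring
    rw [this, PySem.List.slice_from_natCast]
  rw [this]
  simp only [List.length_drop]
  omega

-- ===== PRECONDITION & SPEC =====
def Spec_declarations (args : List String) (out : String) : Prop := out = declarations_alt args
instance (args : List String) (out : String) : Decidable (Spec_declarations args out) := by unfold Spec_declarations; infer_instance

-- ===== CLAIM (what is proved, stated in full; the proofs are below) =====
def Claim_equal_declarations : Prop := ∀ (args : List String), Dom_declarations args → Spec_declarations args (declarations args)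

-- ===== LEMMAS AND PROOFS =====

-- canonical recursive form both ports are reduced to
def pvF : List String → String
  | [] => ""
  | a :: r => (if a = "," then "\n" else a) ++ pvF r

-- A's per-element step, isolated
def pvStepA (st : String) (s : String) : String :=
  if s = "," then st ++ "\n" else st ++ s

theorem pvDeclA_eq_foldl (args : List String) :
    declarations args = args.foldl pvStepA "" := by
  unfold declarations
  simpa using PySem.List.foldl_pyRange_pyGetD args "" pvStepA "" (le_refl 0)

theorem pvStepA_shift (st s : String) : pvStepA st s = st ++ pvStepA "" s := by
  unfold pvStepA; split <;> simp

theorem pvFoldA_shift (args : List String) (acc : String) :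
    args.foldl pvStepA acc = acc ++ args.foldl pvStepA "" := by
  induction args generalizing acc with
  | nil => simp
  | cons a rest ih =>
    simp only [List.foldl_cons]
    rw [ih (pvStepA acc a), ih (pvStepA "" a), pvStepA_shift acc a, String.append_assoc]

theorem pvFoldA_eq_pvF (args : List String) : args.foldl pvStepA "" = pvF args := by
  induction args with
  | nil => rfl
  | cons a rest ih =>
    simp only [List.foldl_cons, pvF]
    rw [pvFoldA_shift rest (pvStepA "" a), ih]
    unfold pvStepA
    split <;> simp

theorem pvJoinEmpty_cons (a : String) (l : List String) :
    PySem.Str.join "" (a :: l) = a ++ PySem.Str.join "" l := by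
  rcases l with _ | ⟨b, rest⟩
  · apply String.toList_injective
    simp [PySem.Str.toList_join, PySem.Chars.join_singleton, PySem.Chars.join_nil]
  · apply String.toList_injective
    simp [PySem.Str.toList_join, PySem.Chars.join_cons_cons, String.toList_append]

theorem pvF_no_comma (l : List String) (h : "," ∉ l) :
    pvF l = PySem.Str.join "" l := by
  induction l with
  | nil =>
    apply String.toList_injective
    simp [pvF, PySem.Str.toList_join, PySem.Chars.join_nil]
  | cons a rest ih =>
    have ha : a ≠ "," := fun e => h (e ▸ List.mem_cons_self)
    rw [pvJoinEmpty_cons, pvF, if_neg ha, ih (fun hm => h (List.mem_cons_of_mem a hm))]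

theorem pvF_append_comma (pre suf : List String) (h : "," ∉ pre) :
    pvF (pre ++ "," :: suf) = PySem.Str.join "" pre ++ "\n" ++ pvF suf := by
  induction pre with
  | nil =>
    simp only [List.nil_append, pvF]
    apply String.toList_injective
    simp [PySem.Str.toList_join, PySem.Chars.join_nil, String.toList_append]
  | cons a rest ih =>
    have ha : a ≠ "," := fun e => h (e ▸ List.mem_cons_self)
    simp only [List.cons_append, pvF, if_neg ha]
    rw [ih (fun hm => h (List.mem_cons_of_mem a hm)), pvJoinEmpty_cons]
    simp [String.append_assoc]

theorem pvDeclB_eq_pvF (args : List String) : declarations_alt args = pvF args := by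
  induction args using declarations_alt.induct with
  | case1 args hi =>
    rw [declarations_alt]
    split
    · next heq =>
      have hmem : "," ∉ args := (PySem.List.index?_eq_none_iff args ",").mp heq
      exact (pvF_no_comma args hmem).symm
    · next heq => rw [hi] at heq; exact absurd heq (by simp)
  | case2 args i hi ih =>
    rw [declarations_alt]
    split
    case _ heq => rw [hi] at heq; exact absurd heq (by simp)
    case _ j heq =>
    rw [hi] at heq
    obtain ⟨rfl⟩ : i = j := by injection heq
    obtain ⟨pre, suf, heq, hlen, hnot⟩ := (PySem.List.index?_eq_some_iff args "," i).mp hi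
    have hs1 : PySem.List.slice args (some 0) (some (i : Int)) = pre := by
      rw [PySem.List.slice_zero_start, PySem.List.slice_to_natCast]
      subst heq
      rw [← hlen]
      exact List.take_left
    have hs2 : PySem.List.slice args (some ((i : Int) + 1)) none = suf := by
      have hcast : ((i : Int) + 1) = ((i + 1 : Nat) : Int) := by push_cast; ring
      rw [hcast, PySem.List.slice_from_natCast]
      subst heq
      rw [← hlen]
      simp
    rw [hs2] at ih
    rw [hs1, hs2, ih, heq, pvF_append_comma pre suf hnot]

-- ===== VERDICT (by name: the statement is the Claim_ definition above) =====
theorem declarations_spec : Claim_equal_declarations := by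
  intro args _
  unfold Spec_declarations
  rw [pvDeclA_eq_foldl, pvFoldA_eq_pvF, pvDeclB_eq_pvF]
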